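-- pv_equiv track=rewrite | github.com/Andrew-peng/Halite-bot | train_bot.py | rotate_moves
-- ===== SOURCE A (Python) =====
-- def rotate_moves(moves, num):
--     for x in range(len(moves)):
--         for y in range(len(moves[x])):
--             for z in range(len(moves[x][y])):
--                 if moves[x][y][z] == 0:
--                     continue
--                 else:
--                     moves[x][y][z] = (moves[x][y][z] + num) % 4
--                     if moves[x][y][z] == 0:
--                         moves[x][y][z] = 4
--     return moves
-- ===== SOURCE B (Python) =====
-- # Note: A mutates `moves` in place; B builds a fresh nested list.
-- # The equivalence claimed is about the RETURN value only.
-- def rotate_moves(moves, num):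
--     # Stage 1: flatten the grid into one flat stream of leaves.
--     flat = [v for plane in moves for row in plane for v in row]
--     # Stage 2: transform the flat stream with a precomputed residue table
--     # (residue 0 maps to 4, residues 1..3 to themselves); 0 stays 0.
--     table = [4, 1, 2, 3]
--     out = iter([0 if v == 0 else table[(v + num) % 4] for v in flat])
--     # Stage 3: reshape by consuming the transformed stream against the shape.
--     return [[[next(out) for _ in row] for row in plane] for plane in moves]
-- ===== Notes on version B (the rewrite author's own statement) =====
-- stated objective: alternative
-- what changed: Replaces A's single in-place triple-indexed loop with a staged pipeline: flatten the grid to one flat list, transform it in one flat pass via a precomputed 4-entry residue lookup table (so A's post-fix branch 'if w==0 then 4' disappears), then reshape the transformed stream back against the original shape; B returns a fresh grid instead of mutating the argument (return values identical).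
import Mathlib
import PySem

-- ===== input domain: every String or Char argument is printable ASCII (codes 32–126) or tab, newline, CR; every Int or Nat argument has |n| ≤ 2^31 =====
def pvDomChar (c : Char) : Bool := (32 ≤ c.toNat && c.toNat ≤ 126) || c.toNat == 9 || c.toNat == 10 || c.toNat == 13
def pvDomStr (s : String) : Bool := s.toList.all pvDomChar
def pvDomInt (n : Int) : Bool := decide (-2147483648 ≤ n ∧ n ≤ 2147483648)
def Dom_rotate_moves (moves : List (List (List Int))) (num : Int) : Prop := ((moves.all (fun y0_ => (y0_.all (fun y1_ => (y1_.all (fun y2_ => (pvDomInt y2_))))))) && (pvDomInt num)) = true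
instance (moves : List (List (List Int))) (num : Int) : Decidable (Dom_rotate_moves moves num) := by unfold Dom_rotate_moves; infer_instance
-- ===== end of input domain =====

-- B replaces A's in-place triple-indexed loop by a staged pipeline (flatten, one flat pass via a
-- precomputed residue lookup table, reshape against the original shape); return values identical.
-- Python A mutates its argument in place, B builds a fresh grid: the equivalence proved here is
-- about the RETURN value only.

-- ===== PORT A =====
-- Each Python for-loop over range(len(...)) becomes a foldl over List.range; the in-place
-- assignment moves[x][y][z] = e becomes List.set at that index.
def rotate_moves (moves : List (List (List Int))) (num : Int) : List (List (List Int)) :=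
  (List.range moves.length).foldl (fun ms x =>
    ms.set x (
      (List.range (ms.getD x []).length).foldl (fun pl y =>
        pl.set y (
          (List.range (pl.getD y []).length).foldl (fun row z =>
            if row.getD z 0 = 0 then row
            else
              let w := PySem.Int.mod (row.getD z 0 + num) 4
              row.set z (if w = 0 then 4 else w)
          ) (pl.getD y [])
        )
      ) (ms.getD x [])
    )
  ) moves

-- ===== PORT B =====
-- Stage 3 of Source B: `next(out)` consumed against the shape; each pvTake* returns the built piece
-- together with the remaining stream (headD 0 corresponds to next(); the stream never runs dry).
def pvTakeRow (tmpl : List Int) (s : List Int) : List Int × List Int :=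
  match tmpl with
  | [] => ([], s)
  | _ :: t =>
    let v := s.headD 0
    let (r, s') := pvTakeRow t (s.drop 1)
    (v :: r, s')

def pvTakePlane (tmpl : List (List Int)) (s : List Int) : List (List Int) × List Int :=
  match tmpl with
  | [] => ([], s)
  | row :: t =>
    let (r, s1) := pvTakeRow row s
    let (rs, s2) := pvTakePlane t s1
    (r :: rs, s2)

def pvTakeGrid (tmpl : List (List (List Int))) (s : List Int) : List (List (List Int)) × List Int :=
  match tmpl with
  | [] => ([], s)
  | pl :: t =>
    let (p, s1) := pvTakePlane pl s
    let (ps, s2) := pvTakeGrid t s1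
    (p :: ps, s2)

def rotate_moves_alt (moves : List (List (List Int))) (num : Int) : List (List (List Int)) :=
  let flat := moves.flatMap (fun plane => plane.flatMap (fun row => row))
  let table : List Int := [4, 1, 2, 3]
  let out := flat.map (fun v => if v = 0 then 0 else table.getD (PySem.Int.mod (v + num) 4).toNat 0)
  (pvTakeGrid moves out).1

-- ===== PRECONDITION & SPEC =====
def Spec_rotate_moves (moves : List (List (List Int))) (num : Int) (out : List (List (List Int))) : Prop := out = rotate_moves_alt moves num
instance (moves : List (List (List Int))) (num : Int) (out : List (List (List Int))) : Decidable (Spec_rotate_moves moves num out) := by unfold Spec_rotate_moves; infer_instance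

-- ===== CLAIM (what is proved, stated in full; the proofs are below) =====
def Claim_equal_rotate_moves : Prop := ∀ (moves : List (List (List Int))) (num : Int), Dom_rotate_moves moves num → Spec_rotate_moves moves num (rotate_moves moves num)

-- ===== LEMMAS AND PROOFS =====

-- The common leaf transform both sides are shown to compute.
def pvLeaf (num v : Int) : Int :=
  if v = 0 then 0
  else if PySem.Int.mod (v + num) 4 = 0 then 4 else PySem.Int.mod (v + num) 4

-- ---- A-side: the index-wise foldl rewrites each level by a map ----

theorem pv_getD_append {α} (pre post : List α) (p d : α) :
    (pre ++ p :: post).getD pre.length d = p := by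
  induction pre with
  | nil => rfl
  | cons a pre ih => simp [ih]

theorem pv_set_append {α} (pre post : List α) (p w : α) :
    (pre ++ p :: post).set pre.length w = pre ++ w :: post := by
  induction pre with
  | nil => rfl
  | cons a pre ih => simp [ih]

theorem pv_foldl_set_map {α} (g : α → α) (step : List α → Nat → List α)
    (hstep : ∀ (pre post : List α) (p : α), step (pre ++ p :: post) pre.length = pre ++ g p :: post) :
    ∀ (post pre : List α),
      (List.range' pre.length post.length).foldl step (pre ++ post) = pre ++ post.map g := by
  intro post
  induction post with
  | nil => intro pre; simp
  | cons p ps ih =>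
    intro pre
    have h1 : List.range' pre.length (p :: ps).length
        = pre.length :: List.range' (pre.length + 1) ps.length := by
      simp [List.range'_succ]
    rw [h1]
    simp only [List.foldl_cons, hstep pre ps p]
    have h2 : pre ++ g p :: ps = (pre ++ [g p]) ++ ps := by simp
    have h3 : pre.length + 1 = (pre ++ [g p]).length := by simp
    rw [h2, h3, ih (pre ++ [g p])]
    simp

theorem pv_foldl_range_map {α} (g : α → α) (step : List α → Nat → List α)
    (hstep : ∀ (pre post : List α) (p : α), step (pre ++ p :: post) pre.length = pre ++ g p :: post)
    (l : List α) :
    (List.range l.length).foldl step l = l.map g := by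
  have := pv_foldl_set_map g step hstep l []
  simpa [List.range_eq_range'] using this

theorem pv_row_eq (num : Int) (row : List Int) :
    (List.range row.length).foldl (fun r z =>
        if r.getD z 0 = 0 then r
        else
          let w := PySem.Int.mod (r.getD z 0 + num) 4
          r.set z (if w = 0 then 4 else w)) row
    = row.map (pvLeaf num) := by
  apply pv_foldl_range_map
  intro pre post p
  rw [pv_getD_append]
  by_cases h : p = 0
  · simp [h, pvLeaf]
  · simp only [h, if_false]
    rw [pv_set_append]
    simp [pvLeaf, h]

theorem pv_plane_eq (num : Int) (plane : List (List Int)) :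
    (List.range plane.length).foldl (fun pl y =>
        pl.set y (
          (List.range (pl.getD y []).length).foldl (fun row z =>
            if row.getD z 0 = 0 then row
            else
              let w := PySem.Int.mod (row.getD z 0 + num) 4
              row.set z (if w = 0 then 4 else w)) (pl.getD y []))) plane
    = plane.map (fun row => row.map (pvLeaf num)) := by
  apply pv_foldl_range_map
  intro pre post p
  rw [pv_getD_append, pv_set_append, pv_row_eq]

theorem pv_A_eq_map (moves : List (List (List Int))) (num : Int) :
    rotate_moves moves num
      = moves.map (fun plane => plane.map (fun row => row.map (pvLeaf num))) := by
  unfold rotate_moves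
  apply pv_foldl_range_map
  intro pre post p
  rw [pv_getD_append, pv_set_append, pv_plane_eq]

-- ---- B-side: B's table-lookup transform is pvLeaf ----

theorem pv_table_eq (num v : Int) :
    (if v = 0 then 0
     else ([4, 1, 2, 3] : List Int).getD (PySem.Int.mod (v + num) 4).toNat 0)
    = pvLeaf num v := by
  unfold pvLeaf
  by_cases h : v = 0
  · simp [h]
  · simp only [h, if_false]
    have h0 : (0:Int) ≤ PySem.Int.mod (v + num) 4 := PySem.Int.mod_nonneg _ (by norm_num)
    have h4 : PySem.Int.mod (v + num) 4 < 4 := PySem.Int.mod_lt _ (by norm_num)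
    set w := PySem.Int.mod (v + num) 4 with hw
    have : w = 0 ∨ w = 1 ∨ w = 2 ∨ w = 3 := by omega
    rcases this with h' | h' | h' | h' <;> rw [h'] <;> rfl

-- ---- B-side: reshaping the mapped flat stream reproduces the mapped grid ----

theorem pv_takeRow_eq (f : Int → Int) (row rest : List Int) :
    pvTakeRow row (row.map f ++ rest) = (row.map f, rest) := by
  induction row generalizing rest with
  | nil => rfl
  | cons a t ih => simp [pvTakeRow, ih]

theorem pv_takePlane_eq (f : Int → Int) (plane : List (List Int)) (rest : List Int) :
    pvTakePlane plane (plane.flatMap (fun row => row.map f) ++ rest)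
      = (plane.map (fun row => row.map f), rest) := by
  induction plane generalizing rest with
  | nil => rfl
  | cons row t ih =>
    simp only [List.flatMap_cons, List.append_assoc]
    simp [pvTakePlane, pv_takeRow_eq, ih]

theorem pv_takeGrid_eq (f : Int → Int) (grid : List (List (List Int))) (rest : List Int) :
    pvTakeGrid grid (grid.flatMap (fun plane => plane.flatMap (fun row => row.map f)) ++ rest)
      = (grid.map (fun plane => plane.map (fun row => row.map f)), rest) := by
  induction grid generalizing rest with
  | nil => rfl
  | cons pl t ih =>
    simp only [List.flatMap_cons, List.append_assoc]
    simp [pvTakeGrid, pv_takePlane_eq, ih]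

theorem pv_B_eq_map (moves : List (List (List Int))) (num : Int) :
    rotate_moves_alt moves num
      = moves.map (fun plane => plane.map (fun row => row.map (pvLeaf num))) := by
  unfold rotate_moves_alt
  simp only [pv_table_eq, List.map_flatMap]
  have h := pv_takeGrid_eq (pvLeaf num) moves []
  rw [List.append_nil] at h
  rw [h]

-- ===== VERDICT (by name: the statement is the Claim_ definition above) =====
theorem rotate_moves_spec : Claim_equal_rotate_moves := by
  intro moves num _
  show rotate_moves moves num = rotate_moves_alt moves num
  rw [pv_A_eq_map, pv_B_eq_map]
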